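-- pv_equiv track=rewrite | github.com/m1sterzer0/DaveProgrammingCompetitions | hackercup/python/2015/1_C.py | solveStressful
-- ===== SOURCE A (Python) =====
-- MOD = 1_000_000_007
--
-- def solveStressful(A,B) :
--     dp = [0] * (B+1); dp[0] = 1
--     ndp = [0] * (B+1)
--     for myscore in range(0,A+1) :
--         for i in range(B+1) : ndp[i] = 0
--         for oppscore in range(B+1) :
--             if oppscore != B and oppscore < myscore : continue
--             if oppscore < B : dp[oppscore+1] += dp[oppscore]; dp[oppscore+1] %= MOD
--             if oppscore == B or myscore < oppscore : ndp[oppscore] += dp[oppscore]; ndp[oppscore] %= MOD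
--         if myscore < A : dp,ndp = ndp,dp
--     return dp[B]
-- ===== SOURCE B (Python) =====
-- MOD = 1_000_000_007
--
-- def solveStressful(A, B):
--     # Transposed pull-form DP: iterate the opponent's score as the outer loop,
--     # building each column from the explicit two-term recurrence
--     #   f(m, o) = [opp point: f(m, o-1) if m <= o-1] + [my point: f(m-1, o) if o == B or m-1 < o]
--     prev = []
--     for o in range(B + 1):
--         cur = [0] * (A + 1)
--         for m in range(A + 1):
--             v = 1 if (o == 0 and m == 0) else 0
--             if o >= 1 and m <= o - 1:
--                 v += prev[m]
--             if m >= 1 and (o == B or m - 1 < o):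
--                 v += cur[m - 1]
--             cur[m] = v % MOD
--         prev = cur
--     return prev[A]
-- ===== Notes on version B (the rewrite author's own statement) =====
-- stated objective: alternative
-- what changed: Replaces A's row-wise push DP (in-place prefix-sum accumulation over two swapped 1-D arrays with a skip/zero/swap dance) by a transposed pull-form DP: the opponent's score is the outer loop and each fresh column is built from the explicit two-term recurrence f(m,o)=f(m,o-1)[if m<=o-1]+f(m-1,o)[if o==B or m-1<o].
-- outside the precondition, e.g. on solveStressful(-1, 0): A returns 1, B raises IndexError
import Mathlib
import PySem

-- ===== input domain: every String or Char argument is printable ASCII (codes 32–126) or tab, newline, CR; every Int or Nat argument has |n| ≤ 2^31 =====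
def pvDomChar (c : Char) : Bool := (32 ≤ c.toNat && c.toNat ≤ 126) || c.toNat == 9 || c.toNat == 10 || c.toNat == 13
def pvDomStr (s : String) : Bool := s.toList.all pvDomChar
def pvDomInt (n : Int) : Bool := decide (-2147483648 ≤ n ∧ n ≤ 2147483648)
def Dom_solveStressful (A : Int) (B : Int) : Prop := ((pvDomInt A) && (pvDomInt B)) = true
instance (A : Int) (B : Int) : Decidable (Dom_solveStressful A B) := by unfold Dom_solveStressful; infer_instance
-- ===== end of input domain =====

-- B is a transposed pull-form DP: the opponent's score is the outer loop and each fresh column is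
-- built from the explicit two-term recurrence, instead of A's row-wise in-place prefix-sum push
-- over two swapped arrays (alternative decomposition, same asymptotic cost).

def pvMOD : Int := 1000000007

-- ===== PORT A =====
-- dp[oppscore+1] += dp[oppscore]; dp[oppscore+1] %= MOD
def pvADpUpd (dp : List Int) (oppscore : Int) : List Int :=
  let d1 := dp.set (oppscore+1).toNat (dp.getD (oppscore+1).toNat 0 + dp.getD oppscore.toNat 0)
  d1.set (oppscore+1).toNat (PySem.Int.mod (d1.getD (oppscore+1).toNat 0) pvMOD)

-- ndp[oppscore] += dp[oppscore]; ndp[oppscore] %= MOD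
def pvANdpUpd (ndp dp : List Int) (oppscore : Int) : List Int :=
  let n1 := ndp.set oppscore.toNat (ndp.getD oppscore.toNat 0 + dp.getD oppscore.toNat 0)
  n1.set oppscore.toNat (PySem.Int.mod (n1.getD oppscore.toNat 0) pvMOD)

-- body of the `for oppscore in range(B+1)` loop (the `continue` is the first branch)
def pvAInner (B myscore : Int) (st : List Int × List Int) (oppscore : Int) : List Int × List Int :=
  if oppscore ≠ B ∧ oppscore < myscore then st
  else
    let dp := if oppscore < B then pvADpUpd st.1 oppscore else st.1
    let ndp := if oppscore = B ∨ myscore < oppscore then pvANdpUpd st.2 dp oppscore else st.2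
    (dp, ndp)

-- body of the `for myscore in range(0,A+1)` loop: zero ndp, run the oppscore loop, swap if myscore < A
def pvARow (A B : Int) (st : List Int × List Int) (myscore : Int) : List Int × List Int :=
  let ndp := (PySem.List.pyRange 0 (B+1)).foldl (fun l i => l.set i.toNat 0) st.2
  let st2 := (PySem.List.pyRange 0 (B+1)).foldl (pvAInner B myscore) (st.1, ndp)
  if myscore < A then (st2.2, st2.1) else st2

def solveStressful (A : Int) (B : Int) : Int :=
  let dp := (List.replicate (B+1).toNat 0).set 0 1
  let ndp := List.replicate (B+1).toNat 0
  let fin := (PySem.List.pyRange 0 (A+1)).foldl (pvARow A B) (dp, ndp)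
  fin.1.getD B.toNat 0

-- ===== PORT B =====
-- body of `for m in range(A+1)`: v = 1 if (o==0 and m==0) else 0; two gated pulls; cur[m] = v % MOD
def pvBInner (b o : Int) (prev : List Int) (cur : List Int) (m : Int) : List Int :=
  let v0 : Int := if o = 0 ∧ m = 0 then 1 else 0
  let v1 : Int := if 1 ≤ o ∧ m ≤ o - 1 then v0 + prev.getD m.toNat 0 else v0
  let v2 : Int := if 1 ≤ m ∧ (o = b ∨ m - 1 < o) then v1 + cur.getD (m-1).toNat 0 else v1
  cur.set m.toNat (PySem.Int.mod v2 pvMOD)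

-- one column: cur = [0]*(A+1); inner loop over m; becomes the new prev
def pvBCol (a b : Int) (prev : List Int) (o : Int) : List Int :=
  (PySem.List.pyRange 0 (a+1)).foldl (pvBInner b o prev) (List.replicate (a+1).toNat 0)

def solveStressful_alt (A : Int) (B : Int) : Int :=
  ((PySem.List.pyRange 0 (B+1)).foldl (pvBCol A B) []).getD A.toNat 0

-- ===== PRECONDITION & SPEC =====
-- Pre_ excludes negative B, on which the Python A raises IndexError at `dp[0] = 1`, and negative A
-- (outside the natural score domain), where A returns a leftover initial value (1 if B == 0 else 0)
-- while B's own algorithm raises IndexError on its empty column list.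
def Pre_solveStressful (A : Int) (B : Int) : Prop := 0 ≤ A ∧ 0 ≤ B
instance (A : Int) (B : Int) : Decidable (Pre_solveStressful A B) := by unfold Pre_solveStressful; infer_instance

def pvWitness_solveStressful : Int × Int := (3, 4)

def Spec_solveStressful (A : Int) (B : Int) (out : Int) : Prop := out = solveStressful_alt A B
instance (A : Int) (B : Int) (out : Int) : Decidable (Spec_solveStressful A B out) := by unfold Spec_solveStressful; infer_instance

-- ===== CLAIM (what is proved, stated in full; the proofs are below) =====
def Claim_equal_solveStressful : Prop := ∀ (A : Int) (B : Int), Dom_solveStressful A B → Pre_solveStressful A B → Spec_solveStressful A B (solveStressful A B)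

-- ===== LEMMAS AND PROOFS =====

-- the pure two-dimensional recurrence both programs realize:
-- f(m,o) = [opp point from (m,o-1), needs m ≤ o-1] + [my point from (m-1,o), needs o = b or m-1 < o], mod
def pvF (b : Nat) (m : Nat) (o : Nat) : Int :=
  PySem.Int.mod
    ((if _h : 1 ≤ o ∧ m < o then pvF b m (o - 1) else 0)
      + (if _h : 1 ≤ m ∧ (o = b ∨ m ≤ o) then pvF b (m - 1) o else 0)
      + (if m = 0 ∧ o = 0 then (1 : Int) else 0)) pvMOD
termination_by m + o
decreasing_by all_goals omega

theorem pvF_eq (b m o : Nat) : pvF b m o =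
    PySem.Int.mod
      ((if 1 ≤ o ∧ m < o then pvF b m (o - 1) else 0)
        + (if 1 ≤ m ∧ (o = b ∨ m ≤ o) then pvF b (m - 1) o else 0)
        + (if m = 0 ∧ o = 0 then (1 : Int) else 0)) pvMOD := by
  rw [pvF]
  simp [dite_eq_ite]

theorem pvMOD_pos : (0:Int) < pvMOD := by decide

theorem pvF_range (b m o : Nat) : 0 ≤ pvF b m o ∧ pvF b m o < pvMOD := by
  rw [pvF_eq]
  exact ⟨PySem.Int.mod_nonneg _ pvMOD_pos, PySem.Int.mod_lt _ pvMOD_pos⟩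

theorem pv_mod_eq_self (x : Int) (h0 : 0 ≤ x) (h1 : x < pvMOD) :
    PySem.Int.mod x pvMOD = x := by
  rw [PySem.Int.mod_eq_emod_of_pos pvMOD_pos]
  exact Int.emod_eq_of_lt h0 h1

theorem pvF_mod (b m o : Nat) : PySem.Int.mod (pvF b m o) pvMOD = pvF b m o :=
  pv_mod_eq_self _ (pvF_range b m o).1 (pvF_range b m o).2

-- A's value at score (m,b) once b < m: only the `o == B` gate keeps it alive
theorem pvF_gt (b j : Nat) (h : b < j) : pvF b j b = pvF b (j-1) b := by
  rw [pvF_eq]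
  rw [if_neg (by omega : ¬ (1 ≤ b ∧ j < b)), if_pos ⟨by omega, Or.inl rfl⟩,
    if_neg (by omega : ¬ (j = 0 ∧ b = 0))]
  rw [show (0:Int) + pvF b (j-1) b + 0 = pvF b (j-1) b by ring]
  exact pvF_mod b (j-1) b

-- carried-in row j of A's table, elementwise
def pvRIn (b j o : Nat) : Int :=
  if j = 0 then (if o = 0 then 1 else 0)
  else if o = b ∨ j - 1 < o then pvF b (j-1) o else 0

theorem pvRIn_zero (b o : Nat) : pvRIn b 0 o = if o = 0 then 1 else 0 := by simp [pvRIn]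

theorem pvRIn_succ (b j o : Nat) : pvRIn b (j+1) o = if o = b ∨ j < o then pvF b j o else 0 := by
  simp [pvRIn]

-- helpers about list updates (shared by both sides)
theorem pv_getD_set_self (l : List Int) (i : Nat) (v : Int) (h : i < l.length) :
    (l.set i v).getD i 0 = v := by
  simp [List.getD_eq_getElem?_getD, h]

theorem pv_getD_set_ne (l : List Int) (i j : Nat) (v : Int) (h : i ≠ j) :
    (l.set i v).getD j 0 = l.getD j 0 := by
  simp [List.getD_eq_getElem?_getD, h]

-- running prefix sum of `row` (mod pvMOD) started at index mm; 0 below mm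
def pvCum (row : List Int) (mm : Nat) : Nat → Int
  | 0 => if mm = 0 then PySem.Int.mod (row.getD 0 0) pvMOD else 0
  | o+1 => if o+1 < mm then 0 else PySem.Int.mod (pvCum row mm o + row.getD (o+1) 0) pvMOD

-- value of A's dp list at index o after the row-mm pass
def pvPref (row : List Int) (mm o : Nat) : Int :=
  if o < mm then row.getD o 0 else pvCum row mm o

def pvGood (b : Nat) (l : List Int) : Prop :=
  l.length = b + 1 ∧ ∀ o, o ≤ b → 0 ≤ l.getD o 0 ∧ l.getD o 0 < pvMOD

theorem pvCum_range (row : List Int) (mm o : Nat) :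
    0 ≤ pvCum row mm o ∧ pvCum row mm o < pvMOD := by
  cases o with
  | zero =>
    simp only [pvCum]
    split_ifs
    · exact ⟨PySem.Int.mod_nonneg _ pvMOD_pos, PySem.Int.mod_lt _ pvMOD_pos⟩
    · exact ⟨le_refl 0, by decide⟩
  | succ o =>
    simp only [pvCum]
    split_ifs
    · exact ⟨le_refl 0, by decide⟩
    · exact ⟨PySem.Int.mod_nonneg _ pvMOD_pos, PySem.Int.mod_lt _ pvMOD_pos⟩

theorem pvCum_start (row : List Int) (mm : Nat) :
    pvCum row mm mm = PySem.Int.mod (row.getD mm 0) pvMOD := by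
  cases mm with
  | zero => simp [pvCum]
  | succ o =>
    have h : pvCum row (o+1) o = 0 := by
      cases o with
      | zero => simp [pvCum]
      | succ k => simp [pvCum]
    simp [pvCum, h]

theorem pvPref_range (b : Nat) (row : List Int) (hg : pvGood b row) (mm o : Nat) (ho : o ≤ b) :
    0 ≤ pvPref row mm o ∧ pvPref row mm o < pvMOD := by
  rw [pvPref]
  by_cases h : o < mm
  · rw [if_pos h]; exact hg.2 o ho
  · rw [if_neg h]; exact pvCum_range row mm o

-- A's running prefix sums over the carried-in row equal the pure recurrence
theorem pvCum_eq_pvF (b j : Nat) (row : List Int)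
    (hrow : ∀ o, o ≤ b → row.getD o 0 = pvRIn b j o) :
    ∀ o, j ≤ o → o ≤ b → pvCum row j o = pvF b j o := by
  intro o
  induction o with
  | zero =>
    intro hjo hob
    have hj0 : j = 0 := by omega
    subst hj0
    have h0 : pvCum row 0 0 = PySem.Int.mod (row.getD 0 0) pvMOD := by simp [pvCum]
    rw [h0, hrow 0 hob, pvRIn_zero, if_pos rfl, pvF_eq]
    rw [if_neg (by omega : ¬ (1 ≤ 0 ∧ 0 < 0)), if_neg (by omega : ¬ (1 ≤ 0 ∧ (0 = b ∨ 0 ≤ 0))),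
      if_pos ⟨rfl, rfl⟩]
    norm_num
  | succ o ih =>
    intro hjo hob
    by_cases hjo' : j ≤ o
    · -- interior step: pvCum (o+1) = mod (pvCum o + row[o+1])
      have hstep : pvCum row j (o+1) = PySem.Int.mod (pvCum row j o + row.getD (o+1) 0) pvMOD := by
        simp only [pvCum]
        rw [if_neg (by omega : ¬ (o+1 < j))]
      rw [hstep, ih hjo' (by omega), hrow (o+1) hob, pvF_eq b j (o+1)]
      rw [if_pos (⟨by omega, by omega⟩ : 1 ≤ o+1 ∧ j < o+1), Nat.add_sub_cancel]
      cases j with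
      | zero =>
        rw [pvRIn_zero, if_neg (by omega : ¬ (o+1 = 0)),
          if_neg (by omega : ¬ (1 ≤ 0 ∧ (o+1 = b ∨ 0 ≤ o+1))),
          if_neg (by omega : ¬ (0 = 0 ∧ o+1 = 0))]
        ring_nf
      | succ k =>
        rw [pvRIn_succ, if_pos (Or.inr (by omega : k < o+1)),
          if_pos (⟨by omega, Or.inr (by omega)⟩ : 1 ≤ k+1 ∧ (o+1 = b ∨ k+1 ≤ o+1)),
          if_neg (by omega : ¬ (k+1 = 0 ∧ o+1 = 0)), Nat.add_sub_cancel]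
        ring_nf
    · -- start of the chain: j = o+1
      have hj : j = o + 1 := by omega
      subst hj
      rw [pvCum_start, hrow (o+1) hob, pvRIn_succ, if_pos (Or.inr (by omega : o < o+1)),
        pvF_eq b (o+1) (o+1)]
      rw [if_neg (by omega : ¬ (1 ≤ o+1 ∧ o+1 < o+1)),
        if_pos (⟨by omega, Or.inr (le_refl (o+1))⟩ : 1 ≤ o+1 ∧ (o+1 = b ∨ o+1 ≤ o+1)),
        if_neg (by omega : ¬ (o+1 = 0 ∧ o+1 = 0)), Nat.add_sub_cancel]
      congr 1
      ring

theorem pvPref_eq_pvF (b j : Nat) (row : List Int)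
    (hrow : ∀ o, o ≤ b → row.getD o 0 = pvRIn b j o)
    (o : Nat) (ho : o ≤ b) (hgate : o = b ∨ j ≤ o) :
    pvPref row j o = pvF b j o := by
  by_cases hlt : o < j
  · have hob : o = b := by
      rcases hgate with h | h
      · exact h
      · omega
    subst hob
    rw [pvPref, if_pos hlt, hrow o (le_refl o)]
    have hj1 : j ≠ 0 := by omega
    rw [pvRIn, if_neg hj1, if_pos (Or.inl rfl), pvF_gt _ j hlt]
  · rw [pvPref, if_neg hlt]
    exact pvCum_eq_pvF b j row hrow o (by omega) ho

-- ---------- A side: the row pass realizes pvPref (characterization of the inner loop) ----------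

def pvDPChar (b mm j : Nat) (row dp : List Int) : Prop :=
  dp.length = b + 1 ∧ ∀ o, o ≤ b → dp.getD o 0 = if mm < o ∧ o ≤ j then pvCum row mm o else row.getD o 0

def pvNDChar (b mm j : Nat) (row ndp : List Int) : Prop :=
  ndp.length = b + 1 ∧ ∀ o, o ≤ b → ndp.getD o 0 = if o < j ∧ (o = b ∨ mm < o) then pvPref row mm o else 0

theorem pvCum_boundary (b : Nat) (row : List Int) (hg : pvGood b row) (mm : Nat) (hmm : mm ≤ b) :
    pvCum row mm mm = row.getD mm 0 := by
  rw [pvCum_start]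
  exact pv_mod_eq_self _ (hg.2 mm hmm).1 (hg.2 mm hmm).2

theorem pvCum_succ (row : List Int) (mm j : Nat) (hj : mm < j) :
    pvCum row mm j = PySem.Int.mod (pvCum row mm (j-1) + row.getD j 0) pvMOD := by
  obtain ⟨k, rfl⟩ : ∃ k, j = k + 1 := ⟨j - 1, by omega⟩
  simp only [pvCum]
  rw [if_neg (by omega : ¬ (k + 1 < mm))]
  rfl

theorem pvADpUpd_length (dp : List Int) (o : Int) : (pvADpUpd dp o).length = dp.length := by
  simp [pvADpUpd]

theorem pvANdpUpd_length (ndp dp : List Int) (o : Int) : (pvANdpUpd ndp dp o).length = ndp.length := by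
  simp [pvANdpUpd]

theorem pvADpUpd_getD_self (dp : List Int) (j : Nat) (h : j + 1 < dp.length) :
    (pvADpUpd dp ↑j).getD (j+1) 0 = PySem.Int.mod (dp.getD (j+1) 0 + dp.getD j 0) pvMOD := by
  unfold pvADpUpd
  have hc : ((j:Int) + 1).toNat = j + 1 := by omega
  simp only [hc, Int.toNat_natCast]
  rw [pv_getD_set_self _ _ _ (by simpa using h), pv_getD_set_self _ _ _ h]

theorem pvADpUpd_getD_ne (dp : List Int) (j o : Nat) (h : o ≠ j + 1) :
    (pvADpUpd dp ↑j).getD o 0 = dp.getD o 0 := by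
  unfold pvADpUpd
  have hc : ((j:Int) + 1).toNat = j + 1 := by omega
  simp only [hc, Int.toNat_natCast]
  rw [pv_getD_set_ne _ _ _ _ (fun hh => h hh.symm), pv_getD_set_ne _ _ _ _ (fun hh => h hh.symm)]

theorem pvANdpUpd_getD_self (ndp dp : List Int) (j : Nat) (h : j < ndp.length) :
    (pvANdpUpd ndp dp ↑j).getD j 0 = PySem.Int.mod (ndp.getD j 0 + dp.getD j 0) pvMOD := by
  unfold pvANdpUpd
  simp only [Int.toNat_natCast]
  rw [pv_getD_set_self _ _ _ (by simpa using h), pv_getD_set_self _ _ _ h]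

theorem pvANdpUpd_getD_ne (ndp dp : List Int) (j o : Nat) (h : o ≠ j) :
    (pvANdpUpd ndp dp ↑j).getD o 0 = ndp.getD o 0 := by
  unfold pvANdpUpd
  simp only [Int.toNat_natCast]
  rw [pv_getD_set_ne _ _ _ _ (fun hh => h hh.symm), pv_getD_set_ne _ _ _ _ (fun hh => h hh.symm)]

-- one step of A's inner loop preserves the characterizations
theorem pvAInnerStep (b mm : Nat) (row : List Int) (hg : pvGood b row)
    (j : Nat) (hjb : j ≤ b) (dp ndp : List Int)
    (hdp : pvDPChar b mm j row dp) (hnd : pvNDChar b mm j row ndp) :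
    pvDPChar b mm (j+1) row (pvAInner ↑b ↑mm (dp, ndp) ↑j).1 ∧
    pvNDChar b mm (j+1) row (pvAInner ↑b ↑mm (dp, ndp) ↑j).2 := by
  obtain ⟨hdplen, hdpc⟩ := hdp
  obtain ⟨hndlen, hndc⟩ := hnd
  unfold pvAInner
  by_cases hskip : j ≠ b ∧ j < mm
  · rw [if_pos ⟨by exact_mod_cast hskip.1, by exact_mod_cast hskip.2⟩]
    refine ⟨⟨hdplen, fun o ho => ?_⟩, ⟨hndlen, fun o ho => ?_⟩⟩
    · rw [hdpc o ho]
      by_cases h : mm < o ∧ o ≤ j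
      · rw [if_pos h, if_pos ⟨h.1, by omega⟩]
      · rw [if_neg h, if_neg (by
          intro hh
          exact h ⟨hh.1, by omega⟩)]
    · rw [hndc o ho]
      by_cases h : o < j ∧ (o = b ∨ mm < o)
      · rw [if_pos h, if_pos ⟨by omega, h.2⟩]
      · rw [if_neg h, if_neg (by
          intro hh
          refine h ⟨?_, hh.2⟩
          rcases hh.2 with h2 | h2 <;> omega)]
  · rw [if_neg (fun hc => hskip ⟨by exact_mod_cast hc.1, by exact_mod_cast hc.2⟩)]
    simp only
    by_cases hjlt : j < b
    · have hmj : mm ≤ j := by omega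
      rw [if_pos (by exact_mod_cast hjlt : ((j:Int)) < ((b:Int)))]
      have hdplen' : j + 1 < dp.length := by rw [hdplen]; omega
      have hvdp1 : dp.getD (j+1) 0 = row.getD (j+1) 0 := by
        rw [hdpc (j+1) (by omega), if_neg (by omega)]
      have hvdpj : dp.getD j 0 = if mm < j then pvCum row mm j else row.getD j 0 := by
        rw [hdpc j (by omega)]
        by_cases h : mm < j
        · rw [if_pos ⟨h, le_refl j⟩, if_pos h]
        · rw [if_neg (by omega), if_neg h]
      have hnewval : PySem.Int.mod (dp.getD (j+1) 0 + dp.getD j 0) pvMOD = pvCum row mm (j+1) := by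
        rw [pvCum_succ row mm (j+1) (by omega), Nat.add_sub_cancel, hvdp1, hvdpj]
        by_cases h : mm < j
        · rw [if_pos h, Int.add_comm]
        · have hmmj : mm = j := by omega
          subst hmmj
          rw [if_neg h, pvCum_boundary b row hg mm (by omega), Int.add_comm]
      have hDchar : pvDPChar b mm (j+1) row (pvADpUpd dp ↑j) := by
        refine ⟨by rw [pvADpUpd_length]; exact hdplen, fun o ho => ?_⟩
        by_cases h : o = j + 1
        · subst h
          rw [pvADpUpd_getD_self dp j hdplen', hnewval, if_pos (by omega)]
        · rw [pvADpUpd_getD_ne dp j o h, hdpc o ho]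
          by_cases h2 : mm < o ∧ o ≤ j
          · rw [if_pos h2, if_pos ⟨h2.1, by omega⟩]
          · rw [if_neg h2, if_neg (by
              intro hh
              exact h2 ⟨hh.1, by omega⟩)]
      by_cases hcnd : mm < j
      · rw [if_pos (Or.inr (by exact_mod_cast hcnd))]
        refine ⟨hDchar, ⟨by rw [pvANdpUpd_length]; exact hndlen, fun o ho => ?_⟩⟩
        by_cases h : o = j
        · subst h
          rw [pvANdpUpd_getD_self _ _ _ (by rw [hndlen]; omega)]
          have h0 : ndp.getD o 0 = 0 := by rw [hndc o ho, if_neg (by omega)]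
          have hdj : (pvADpUpd dp ↑o).getD o 0 = pvCum row mm o := by
            rw [pvADpUpd_getD_ne dp o o (by omega), hvdpj, if_pos hcnd]
          rw [h0, hdj, Int.zero_add,
            pv_mod_eq_self _ (pvCum_range row mm o).1 (pvCum_range row mm o).2,
            if_pos ⟨by omega, Or.inr hcnd⟩, pvPref, if_neg (by omega)]
        · rw [pvANdpUpd_getD_ne _ _ _ _ h, hndc o ho]
          by_cases h2 : o < j ∧ (o = b ∨ mm < o)
          · rw [if_pos h2, if_pos ⟨by omega, h2.2⟩]
          · rw [if_neg h2, if_neg (by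
              intro hh
              exact h2 ⟨by omega, hh.2⟩)]
      · rw [if_neg (by
          intro hc
          rcases hc with hc | hc
          · exact absurd (show j = b by exact_mod_cast hc) (by omega)
          · exact hcnd (by exact_mod_cast hc))]
        refine ⟨hDchar, ⟨hndlen, fun o ho => ?_⟩⟩
        rw [hndc o ho]
        by_cases h2 : o < j ∧ (o = b ∨ mm < o)
        · rw [if_pos h2, if_pos ⟨by omega, h2.2⟩]
        · rw [if_neg h2, if_neg (by
            intro hh
            refine h2 ⟨?_, hh.2⟩
            rcases hh.2 with h3 | h3 <;> omega)]
    · have hjb' : j = b := by omega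
      rw [if_neg (by exact_mod_cast (show ¬ (j < b) by omega)),
        if_pos (Or.inl (by exact_mod_cast hjb'))]
      refine ⟨⟨hdplen, fun o ho => ?_⟩,
        ⟨by rw [pvANdpUpd_length]; exact hndlen, fun o ho => ?_⟩⟩
      · rw [hdpc o ho]
        by_cases h : mm < o ∧ o ≤ j
        · rw [if_pos h, if_pos ⟨h.1, by omega⟩]
        · rw [if_neg h, if_neg (by
            intro hh
            exact h ⟨hh.1, by omega⟩)]
      · by_cases h : o = j
        · subst h
          rw [pvANdpUpd_getD_self _ _ _ (by rw [hndlen]; omega)]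
          have h0 : ndp.getD o 0 = 0 := by rw [hndc o ho, if_neg (by omega)]
          have hvdpj : dp.getD o 0 = if mm < o then pvCum row mm o else row.getD o 0 := by
            rw [hdpc o ho]
            by_cases hh : mm < o
            · rw [if_pos ⟨hh, le_refl o⟩, if_pos hh]
            · rw [if_neg (by omega), if_neg hh]
          rw [h0, hvdpj, Int.zero_add]
          by_cases hh : mm < o
          · rw [if_pos hh,
              pv_mod_eq_self _ (pvCum_range row mm o).1 (pvCum_range row mm o).2,
              if_pos ⟨by omega, Or.inr hh⟩, pvPref, if_neg (by omega)]
          · rw [if_neg hh, pv_mod_eq_self _ (hg.2 o ho).1 (hg.2 o ho).2,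
              if_pos ⟨by omega, Or.inl (by omega)⟩, pvPref]
            by_cases h3 : o < mm
            · rw [if_pos h3]
            · have ho2 : o = mm := by omega
              subst ho2
              rw [if_neg h3, pvCum_boundary b row hg o ho]
        · rw [pvANdpUpd_getD_ne _ _ _ _ h, hndc o ho]
          by_cases h2 : o < j ∧ (o = b ∨ mm < o)
          · rw [if_pos h2, if_pos ⟨by omega, h2.2⟩]
          · rw [if_neg h2, if_neg (by
              intro hh
              exact h2 ⟨by omega, hh.2⟩)]

-- characterization of A's inner (oppscore) loop, by induction on the remaining range
theorem pvRowAux (b mm : Nat) (row : List Int) (hg : pvGood b row) :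
    ∀ (n j : Nat) (dp ndp : List Int), j + n = b + 1 →
    pvDPChar b mm j row dp → pvNDChar b mm j row ndp →
    pvDPChar b mm (b+1) row ((PySem.List.pyRange (↑j) ((↑b:Int)+1)).foldl (pvAInner ↑b ↑mm) (dp, ndp)).1 ∧
    pvNDChar b mm (b+1) row ((PySem.List.pyRange (↑j) ((↑b:Int)+1)).foldl (pvAInner ↑b ↑mm) (dp, ndp)).2 := by
  intro n
  induction n with
  | zero =>
    intro j dp ndp hj hdp hnd
    rw [PySem.List.pyRange_one_eq_nil (by exact_mod_cast by omega)]
    simp only [List.foldl_nil]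
    have hj' : j = b + 1 := by omega
    subst hj'
    exact ⟨hdp, hnd⟩
  | succ n ih =>
    intro j dp ndp hj hdp hnd
    rw [PySem.List.pyRange_one_cons (by exact_mod_cast by omega : (↑j:Int) < (↑b:Int)+1)]
    simp only [List.foldl_cons]
    obtain ⟨h1, h2⟩ := pvAInnerStep b mm row hg j (by omega) dp ndp hdp hnd
    have := ih (j+1) _ _ (by omega) h1 h2
    convert this using 3 <;> (try push_cast) <;> (try ring)

-- A's inner loop (after zeroing ndp) computes pvPref and the masked next row
theorem pvRowMain (b mm : Nat) (row ndp0 : List Int) (hg : pvGood b row)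
    (hn : ndp0.length = b + 1) (hn0 : ∀ o, o ≤ b → ndp0.getD o 0 = 0) :
    ((PySem.List.pyRange 0 ((↑b:Int)+1)).foldl (pvAInner ↑b ↑mm) (row, ndp0)).1.length = b + 1 ∧
    ((PySem.List.pyRange 0 ((↑b:Int)+1)).foldl (pvAInner ↑b ↑mm) (row, ndp0)).2.length = b + 1 ∧
    (∀ o, o ≤ b → ((PySem.List.pyRange 0 ((↑b:Int)+1)).foldl (pvAInner ↑b ↑mm) (row, ndp0)).1.getD o 0 = pvPref row mm o) ∧
    (∀ o, o ≤ b → ((PySem.List.pyRange 0 ((↑b:Int)+1)).foldl (pvAInner ↑b ↑mm) (row, ndp0)).2.getD o 0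
      = if o = b ∨ mm < o then pvPref row mm o else 0) := by
  have h0 : pvDPChar b mm 0 row row := by
    refine ⟨hg.1, fun o ho => ?_⟩
    rw [if_neg (by omega)]
  have h0' : pvNDChar b mm 0 row ndp0 := by
    refine ⟨hn, fun o ho => ?_⟩
    rw [if_neg (by omega), hn0 o ho]
  have := pvRowAux b mm row hg (b+1) 0 row ndp0 (by omega) h0 h0'
  rw [show ((0:Nat):Int) = (0:Int) from rfl] at this
  obtain ⟨⟨hl1, hc1⟩, ⟨hl2, hc2⟩⟩ := this
  refine ⟨hl1, hl2, fun o ho => ?_, fun o ho => ?_⟩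
  · rw [hc1 o ho, pvPref]
    by_cases h : mm < o
    · rw [if_pos ⟨h, by omega⟩, if_neg (by omega)]
    · rw [if_neg (by omega)]
      by_cases h2 : o < mm
      · rw [if_pos h2]
      · have : o = mm := by omega
        subst this
        rw [if_neg h2, pvCum_boundary b row hg o ho]
  · rw [hc2 o ho]
    by_cases h : o = b ∨ mm < o
    · rw [if_pos ⟨by omega, h⟩, if_pos h]
    · rw [if_neg (fun hh => h hh.2), if_neg h]

theorem pvZeroAux (b : Nat) : ∀ (n j : Nat) (l : List Int), j + n = b + 1 → l.length = b + 1 →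
    (∀ o, o ≤ b → o < j → l.getD o 0 = 0) →
    ((PySem.List.pyRange (↑j) ((↑b:Int)+1)).foldl (fun l i => l.set i.toNat 0) l).length = b + 1 ∧
    (∀ o, o ≤ b → ((PySem.List.pyRange (↑j) ((↑b:Int)+1)).foldl (fun l i => l.set i.toNat 0) l).getD o 0 = 0) := by
  intro n
  induction n with
  | zero =>
    intro j l hj hlen hchar
    rw [PySem.List.pyRange_one_eq_nil (by exact_mod_cast by omega)]
    exact ⟨hlen, fun o ho => hchar o ho (by omega)⟩
  | succ n ih =>
    intro j l hj hlen hchar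
    rw [PySem.List.pyRange_one_cons (by exact_mod_cast by omega : (↑j:Int) < (↑b:Int)+1)]
    simp only [List.foldl_cons, Int.toNat_natCast]
    have hjlen : j < l.length := by omega
    have := ih (j+1) (l.set j 0) (by omega) (by simpa using hlen) ?_
    · convert this using 3 <;> (try push_cast) <;> (try ring)
    · intro o ho hoj
      rcases Nat.lt_succ_iff_lt_or_eq.mp hoj with h | h
      · rw [pv_getD_set_ne _ _ _ _ (by omega)]; exact hchar o ho h
      · subst h; exact pv_getD_set_self _ _ _ hjlen

-- zeroing loop: elementwise characterization
theorem pvZeroChar (b : Nat) (ndp : List Int) (hlen : ndp.length = b + 1) :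
    (((PySem.List.pyRange 0 ((↑b:Int)+1)).foldl (fun l i => l.set i.toNat 0) ndp).length = b + 1) ∧
    (∀ o, o ≤ b → ((PySem.List.pyRange 0 ((↑b:Int)+1)).foldl (fun l i => l.set i.toNat 0) ndp).getD o 0 = 0) := by
  have := pvZeroAux b (b+1) 0 ndp (by omega) hlen (by omega)
  simpa using this

theorem pvARow_eval (Aint B : Int) (row ndp : List Int) (m : Int) :
    pvARow Aint B (row, ndp) m =
      (if m < Aint
       then (((PySem.List.pyRange 0 (B+1)).foldl (pvAInner B m)
               (row, (PySem.List.pyRange 0 (B+1)).foldl (fun l i => l.set i.toNat 0) ndp)).2,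
             ((PySem.List.pyRange 0 (B+1)).foldl (pvAInner B m)
               (row, (PySem.List.pyRange 0 (B+1)).foldl (fun l i => l.set i.toNat 0) ndp)).1)
       else (PySem.List.pyRange 0 (B+1)).foldl (pvAInner B m)
              (row, (PySem.List.pyRange 0 (B+1)).foldl (fun l i => l.set i.toNat 0) ndp)) := rfl

-- A's outer (myscore) loop computes pvF at (a, b)
theorem pvOuterA (a b : Nat) : ∀ (n j : Nat) (row ndp : List Int), j + n = a + 1 →
    pvGood b row → ndp.length = b + 1 →
    (∀ o, o ≤ b → row.getD o 0 = pvRIn b j o) →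
    ((PySem.List.pyRange (↑j) ((↑a:Int)+1)).foldl (pvARow ↑a ↑b) (row, ndp)).1.getD b 0 = pvF b a b := by
  intro n
  induction n with
  | zero =>
    intro j row ndp hj hg hnd hrow
    rw [PySem.List.pyRange_one_eq_nil (by exact_mod_cast by omega)]
    simp only [List.foldl_nil]
    have hj' : j = a + 1 := by omega
    subst hj'
    rw [hrow b (le_refl b), pvRIn_succ, if_pos (Or.inl rfl)]
  | succ n ih =>
    intro j row ndp hj hg hnd hrow
    rw [PySem.List.pyRange_one_cons (by exact_mod_cast by omega : (↑j:Int) < (↑a:Int)+1)]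
    simp only [List.foldl_cons, pvARow_eval]
    have hz := pvZeroChar b ndp hnd
    have hst := pvRowMain b j row _ hg hz.1 hz.2
    by_cases hlast : (↑j:Int) = ↑a
    · have hja : j = a := by exact_mod_cast hlast
      subst hja
      rw [if_neg (by omega), PySem.List.pyRange_one_eq_nil (by omega : (↑j:Int) + 1 ≤ (↑j:Int) + 1)]
      simp only [List.foldl_nil]
      rw [hst.2.2.1 b (le_refl b)]
      exact pvPref_eq_pvF b j row hrow b (le_refl b) (Or.inl rfl)
    · have hlt : (↑j:Int) < ↑a := by
        have : j ≠ a := fun h => hlast (by exact_mod_cast h)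
        have : j < a := by omega
        exact_mod_cast this
      rw [if_pos hlt]
      have hmask : ∀ o, o ≤ b →
          (((PySem.List.pyRange 0 ((↑b:Int)+1)).foldl (pvAInner ↑b ↑j)
            (row, (PySem.List.pyRange 0 ((↑b:Int)+1)).foldl (fun l i => l.set i.toNat 0) ndp)).2).getD o 0
          = pvRIn b (j+1) o := by
        intro o ho
        rw [hst.2.2.2 o ho, pvRIn_succ]
        by_cases h : o = b ∨ j < o
        · rw [if_pos h, if_pos h]
          exact pvPref_eq_pvF b j row hrow o ho (by
            rcases h with h | h
            · exact Or.inl h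
            · exact Or.inr (by omega))
        · rw [if_neg h, if_neg h]
      have hgood2 : pvGood b (((PySem.List.pyRange 0 ((↑b:Int)+1)).foldl (pvAInner ↑b ↑j)
          (row, (PySem.List.pyRange 0 ((↑b:Int)+1)).foldl (fun l i => l.set i.toNat 0) ndp)).2) := by
        refine ⟨hst.2.1, fun o ho => ?_⟩
        rw [hst.2.2.2 o ho]
        by_cases h : o = b ∨ j < o
        · rw [if_pos h]; exact pvPref_range b row hg j o ho
        · rw [if_neg h]; exact ⟨le_refl 0, by decide⟩
      have := ih (j+1) _ _ (by omega) hgood2 hst.1 hmask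
      convert this using 3 <;> (try push_cast) <;> (try ring)

-- ---------- B side: the inner (m) loop fills column o with pvF ----------

theorem pvBColAux (a b o : Nat) (prev : List Int)
    (hprev : 1 ≤ o → ∀ m, m ≤ a → prev.getD m 0 = pvF b m (o - 1)) :
    ∀ (n k : Nat) (cur : List Int), k + n = a + 1 → cur.length = a + 1 →
    (∀ m, m ≤ a → cur.getD m 0 = if m < k then pvF b m o else 0) →
    ((PySem.List.pyRange (↑k) ((↑a:Int)+1)).foldl (pvBInner ↑b ↑o prev) cur).length = a + 1 ∧
    (∀ m, m ≤ a → ((PySem.List.pyRange (↑k) ((↑a:Int)+1)).foldl (pvBInner ↑b ↑o prev) cur).getD m 0 = pvF b m o) := by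
  intro n
  induction n with
  | zero =>
    intro k cur hk hlen hcur
    rw [PySem.List.pyRange_one_eq_nil (by exact_mod_cast by omega)]
    simp only [List.foldl_nil]
    refine ⟨hlen, fun m hm => ?_⟩
    rw [hcur m hm, if_pos (by omega)]
  | succ n ih =>
    intro k cur hk hlen hcur
    rw [PySem.List.pyRange_one_cons (by exact_mod_cast by omega : (↑k:Int) < (↑a:Int)+1)]
    simp only [List.foldl_cons]
    have hka : k ≤ a := by omega
    have hklen : k < cur.length := by omega
    -- the written value is pvF b k o
    have hval : pvBInner ↑b ↑o prev cur ↑k = cur.set k (pvF b k o) := by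
      unfold pvBInner
      simp only [Int.toNat_natCast]
      congr 1
      rw [pvF_eq b k o]
      congr 1
      rw [show ((k:Int) - 1).toNat = k - 1 by omega,
        hcur (k-1) (by omega : k - 1 ≤ a)]
      split_ifs <;>
        first
          | omega
          | (try rw [hprev (by omega) k hka]); ring
    rw [hval]
    have := ih (k+1) (cur.set k (pvF b k o)) (by omega) (by simpa using hlen) ?_
    · convert this using 3 <;> (try push_cast) <;> (try ring)
    · intro m hm
      by_cases h : m = k
      · subst h
        rw [pv_getD_set_self _ _ _ hklen, if_pos (by omega)]
      · rw [pv_getD_set_ne _ _ _ _ (fun hh => h hh.symm), hcur m hm]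
        by_cases h2 : m < k
        · rw [if_pos h2, if_pos (by omega)]
        · rw [if_neg h2, if_neg (by omega)]

-- B's outer (o) loop carries column o of pvF as prev
theorem pvBOuter (a b : Nat) : ∀ (n j : Nat) (prev : List Int), j + n = b + 1 →
    (1 ≤ j → (prev.length = a + 1 ∧ ∀ m, m ≤ a → prev.getD m 0 = pvF b m (j - 1))) →
    ((PySem.List.pyRange (↑j) ((↑b:Int)+1)).foldl (pvBCol ↑a ↑b) prev).getD a 0 = pvF b a b := by
  intro n
  induction n with
  | zero =>
    intro j prev hj hprev
    rw [PySem.List.pyRange_one_eq_nil (by exact_mod_cast by omega)]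
    simp only [List.foldl_nil]
    have hj' : j = b + 1 := by omega
    subst hj'
    rw [(hprev (by omega)).2 a (le_refl a), Nat.add_sub_cancel]
  | succ n ih =>
    intro j prev hj hprev
    rw [PySem.List.pyRange_one_cons (by exact_mod_cast by omega : (↑j:Int) < (↑b:Int)+1)]
    simp only [List.foldl_cons]
    have hcol : pvBCol ↑a ↑b prev ↑j
        = (PySem.List.pyRange 0 ((↑a:Int)+1)).foldl (pvBInner ↑b ↑j prev) (List.replicate (a+1) 0) := by
      unfold pvBCol
      rw [show ((↑a:Int)+1).toNat = a + 1 by omega]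
    have hinit : ∀ m, m ≤ a → (List.replicate (a+1) (0:Int)).getD m 0 = if m < 0 then pvF b m j else 0 := by
      intro m hm
      rw [if_neg (by omega)]
      rw [List.getD_eq_getElem?_getD, List.getElem?_replicate]
      split <;> rfl
    have hcolchar := pvBColAux a b j prev (fun ho m hm => (hprev ho).2 m hm)
      (a+1) 0 (List.replicate (a+1) 0) (by omega) (by simp) hinit
    rw [show ((0:Nat):Int) = (0:Int) from rfl] at hcolchar
    have := ih (j+1) (pvBCol ↑a ↑b prev ↑j) (by omega) ?_
    · convert this using 3 <;> (try push_cast) <;> (try ring)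
    · intro _
      rw [hcol]
      exact ⟨hcolchar.1, fun m hm => by rw [hcolchar.2 m hm, Nat.add_sub_cancel]⟩

-- initial row of A
theorem pv_initrow_getD (b o : Nat) :
    ((1:Int) :: List.replicate b 0).getD o 0 = if o = 0 then 1 else 0 := by
  cases o with
  | zero => rfl
  | succ k =>
    rw [if_neg (by omega)]
    show (List.replicate b (0:Int)).getD k 0 = 0
    rw [List.getD_eq_getElem?_getD, List.getElem?_replicate]
    split <;> rfl

theorem pv_initrow_good (b : Nat) : pvGood b ((1:Int) :: List.replicate b 0) := by
  refine ⟨by simp, fun o ho => ?_⟩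
  rw [pv_initrow_getD]
  split
  · exact ⟨by decide, by decide⟩
  · exact ⟨le_refl 0, by decide⟩

-- ===== VERDICT (by name: the statement is the Claim_ definition above) =====
theorem solveStressful_spec : Claim_equal_solveStressful := by
  intro A B hdom hpre
  obtain ⟨hA, hB⟩ := hpre
  unfold Spec_solveStressful
  lift A to Nat using hA with a
  lift B to Nat using hB with b
  have hAside : solveStressful ↑a ↑b = pvF b a b := by
    simp only [solveStressful]
    rw [show ((b:Int)+1).toNat = b + 1 by omega, Int.toNat_natCast]
    have hdp0 : (List.replicate (b+1) (0:Int)).set 0 1 = 1 :: List.replicate b 0 := by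
      simp [List.replicate_succ]
    rw [hdp0]
    have := pvOuterA a b (a+1) 0 (1 :: List.replicate b 0) (List.replicate (b+1) 0)
      (by omega) (pv_initrow_good b) (by simp)
      (fun o ho => by rw [pv_initrow_getD, pvRIn_zero])
    simpa using this
  have hBside : solveStressful_alt ↑a ↑b = pvF b a b := by
    simp only [solveStressful_alt]
    rw [Int.toNat_natCast]
    have := pvBOuter a b (b+1) 0 [] (by omega) (by omega)
    simpa using this
  rw [hAside, hBside]
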